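-- pv_equiv track=rewrite | github.com/madhuri-majety/IK | Automation/remove_extra_consecutives.py | remove_extra_consecutives
-- ===== SOURCE A (Python) =====
-- def remove_extra_consecutives(inp_str, max_occurences):
--     prev_char = None
--     count = 0
--     output = []
--
--     for cur_char in inp_str:
--         if cur_char != prev_char:
--             prev_char = cur_char
--             count = 0
--         else:
--             count += 1
--
--         if count < max_occurences:
--             output.append(cur_char)
--
--     return "".join(output)
-- ===== SOURCE B (Python) =====
-- def remove_extra_consecutives(inp_str, max_occurences):
--     parts = []
--     i = 0
--     n = len(inp_str)
--     while i < n: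
--         j = i
--         while j < n and inp_str[j] == inp_str[i]:
--             j += 1
--         parts.append(inp_str[i] * min(j - i, max_occurences))
--         i = j
--     return "".join(parts)
-- ===== Notes on version B (the rewrite author's own statement) =====
-- stated objective: alternative
-- what changed: B splits the string into maximal runs with a two-pointer scan and emits char*min(run_length, max_occurences) per run, instead of A's per-character state machine with prev_char/count and a per-character append test.
import Mathlib
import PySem

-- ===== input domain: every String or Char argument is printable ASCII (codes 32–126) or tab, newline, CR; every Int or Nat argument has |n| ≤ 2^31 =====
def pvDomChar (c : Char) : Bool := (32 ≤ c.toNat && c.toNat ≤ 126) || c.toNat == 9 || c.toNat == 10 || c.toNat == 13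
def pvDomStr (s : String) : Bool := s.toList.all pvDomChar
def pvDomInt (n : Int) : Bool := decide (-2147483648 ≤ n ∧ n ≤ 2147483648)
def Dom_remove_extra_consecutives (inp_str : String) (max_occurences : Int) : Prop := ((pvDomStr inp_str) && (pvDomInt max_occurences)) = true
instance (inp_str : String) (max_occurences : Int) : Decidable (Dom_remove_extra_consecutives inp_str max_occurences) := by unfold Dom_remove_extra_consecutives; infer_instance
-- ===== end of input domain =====

-- B collapses each maximal run of equal characters to at most max_occurences copies via a
-- run-grouping scan instead of A's per-character prev/count state machine; objective: alternative.

-- ===== PORT A =====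
-- one loop iteration of A: update prev_char/count, then append cur_char if count < max_occurences
def pvStepA (max_occurences : Int) (st : Option Char × Int × List Char) (cur : Char) :
    Option Char × Int × List Char :=
  let (prev, count, output) := st
  let (prev, count) := if some cur ≠ prev then (some cur, 0) else (prev, count + 1)
  if count < max_occurences then (prev, count, output ++ [cur]) else (prev, count, output)

def remove_extra_consecutives (inp_str : String) (max_occurences : Int) : String :=
  String.mk (inp_str.toList.foldl (pvStepA max_occurences) (none, 0, [])).2.2

-- ===== PORT B =====
-- B's outer while loop over runs: the inner `while j < n and inp_str[j] == inp_str[i]` scan is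
-- the takeWhile/dropWhile split; each run contributes inp_str[i] * min(run_length, max_occurences)
def pvRunsB (max_occurences : Int) (l : List Char) : List Char :=
  match l with
  | [] => []
  | c :: cs =>
      List.replicate (min ((cs.takeWhile (· == c)).length + 1 : Int) max_occurences).toNat c
        ++ pvRunsB max_occurences (cs.dropWhile (· == c))
termination_by l.length
decreasing_by
  simp only [List.length_cons]
  exact Nat.lt_succ_of_le (List.length_dropWhile_le _ _)

def remove_extra_consecutives_alt (inp_str : String) (max_occurences : Int) : String :=
  String.mk (pvRunsB max_occurences inp_str.toList)

-- ===== PRECONDITION & SPEC =====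
def Spec_remove_extra_consecutives (inp_str : String) (max_occurences : Int) (out : String) : Prop := out = remove_extra_consecutives_alt inp_str max_occurences
instance (inp_str : String) (max_occurences : Int) (out : String) : Decidable (Spec_remove_extra_consecutives inp_str max_occurences out) := by unfold Spec_remove_extra_consecutives; infer_instance

-- ===== CLAIM (what is proved, stated in full; the proofs are below) =====
def Claim_equal_remove_extra_consecutives : Prop := ∀ (inp_str : String) (max_occurences : Int), Dom_remove_extra_consecutives inp_str max_occurences → Spec_remove_extra_consecutives inp_str max_occurences (remove_extra_consecutives inp_str max_occurences)

-- ===== LEMMAS AND PROOFS =====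

-- number of appended characters while count runs j+1 … j+r against threshold m
def pvCnt (m j : Int) : ℕ → ℕ
  | 0 => 0
  | r + 1 => (if j + 1 < m then 1 else 0) + pvCnt m (j + 1) r

theorem pvCnt_closed (m : Int) : ∀ (r : ℕ) (j : Int),
    pvCnt m j r = (min (j + r) (m - 1) - min j (m - 1)).toNat := by
  intro r
  induction r with
  | zero => intro j; simp [pvCnt]
  | succ r ih =>
    intro j
    rw [pvCnt, ih (j + 1)]
    split_ifs with h <;> omega

-- A's loop over r further copies of c, starting with prev = some c and count = j
theorem pvA_run (m : Int) (c : Char) :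
    ∀ (r : ℕ) (j : Int) (out : List Char),
      List.foldl (pvStepA m) (some c, j, out) (List.replicate r c)
        = (some c, j + r, out ++ List.replicate (pvCnt m j r) c) := by
  intro r
  induction r with
  | zero => intro j out; simp [pvCnt]
  | succ r ih =>
    intro j out
    rw [List.replicate_succ, List.foldl_cons]
    have hstep : pvStepA m (some c, j, out) c
        = (some c, j + 1, out ++ if j + 1 < m then [c] else []) := by
      have hne : ¬ ((some c : Option Char) ≠ some c) := fun h => h rfl
      simp only [pvStepA, if_neg hne]
      split_ifs with h <;> simp
    rw [hstep, ih, pvCnt]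
    split_ifs with h
    · refine Prod.ext rfl (Prod.ext (by push_cast; ring) ?_)
      show out ++ [c] ++ _ = out ++ _
      rw [List.append_assoc, List.singleton_append, ← List.replicate_succ, Nat.add_comm 1]
    · refine Prod.ext rfl (Prod.ext (by push_cast; ring) ?_)
      show out ++ [] ++ _ = out ++ _
      rw [List.append_nil, Nat.zero_add]

theorem pvMain (m : Int) : ∀ (l : List Char) (p : Option Char) (j : Int) (out : List Char),
    (∀ c, l.head? = some c → p ≠ some c) →
    (List.foldl (pvStepA m) (p, j, out) l).2.2 = out ++ pvRunsB m l := by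
  intro l
  induction l using pvRunsB.induct with
  | case1 => intro p j out _; simp [pvRunsB]
  | case2 c cs ih =>
    intro p j out hp
    have hpc : p ≠ some c := hp c rfl
    set run := cs.takeWhile (· == c) with hrun
    set rest := cs.dropWhile (· == c) with hrest
    have hsplit : cs = run ++ rest := (List.takeWhile_append_dropWhile).symm
    have hrepl : run = List.replicate run.length c := by
      apply List.eq_replicate_of_mem
      intro x hx
      have := List.mem_takeWhile_imp hx
      simpa using this.symm
    have hstep : pvStepA m (p, j, out) c
        = (some c, 0, out ++ if (0:Int) < m then [c] else []) := by
      simp only [pvStepA]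
      have : some c ≠ p := fun h => hpc h.symm
      rw [if_pos this]
      split_ifs with h <;> simp
    have hresthead : ∀ d, rest.head? = some d → (some c : Option Char) ≠ some d := by
      intro d hd he
      have hnot : ¬ (d == c) = true := by
        have := List.head?_dropWhile_not (· == c) cs
        rw [← hrest, hd] at this
        simpa using this
      exact hnot (by simp [← Option.some.inj he])
    have hcount : (if (0:Int) < m then [c] else []) ++ List.replicate (pvCnt m 0 run.length) c
        = List.replicate (min ((run.length : ℕ) + 1 : Int) m).toNat c := by
      rw [pvCnt_closed]
      split_ifs with h
      · rw [List.singleton_append, ← List.replicate_succ]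
        congr 1
        omega
      · rw [List.nil_append]
        congr 1
        omega
    calc (List.foldl (pvStepA m) (p, j, out) (c :: cs)).2.2
        = (List.foldl (pvStepA m)
            (List.foldl (pvStepA m) (some c, 0, out ++ if (0:Int) < m then [c] else [])
              (List.replicate run.length c)) rest).2.2 := by
          rw [List.foldl_cons, hstep]
          conv_lhs => rw [hsplit]
          rw [List.foldl_append]
          conv_lhs => rw [hrepl]
      _ = out ++ pvRunsB m (c :: cs) := by
          rw [pvA_run, ih _ _ _ hresthead]
          conv_rhs => rw [pvRunsB]
          rw [← hrun, ← hrest, ← List.append_assoc, List.append_assoc out, hcount,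
            List.append_assoc]

-- ===== VERDICT (by name: the statement is the Claim_ definition above) =====
theorem remove_extra_consecutives_spec : Claim_equal_remove_extra_consecutives := by
  intro s m _
  unfold Spec_remove_extra_consecutives remove_extra_consecutives remove_extra_consecutives_alt
  have := pvMain m s.toList none 0 [] (by intro c _ h; simp at h)
  rw [this]
  simp
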